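-- pv_equiv track=rewrite | github.com/MadTown86/codewars_problems | warfiles/summationtriangle1.py | get_sum_buildingtriangle
-- ===== SOURCE A (Python) =====
-- def get_sum_buildingtriangle(n):
--     if n == 0:
--         return 1
--     row, col = 0, 0
--
--     equation = lambda row, col: 2 * row + col + 1
--     tri_sum = 0
--
--
--
--     def rowcur(n, row, col, colm):
--         templ = []
--         if colm > col:
--             col += 1
--             return rowcur(n, row, col, colm)
--         if col == n + 1:
--             return []
--         else:
--             templ.append(equation(row, col))
--             col += 1
--             return templ + rowcur(n, row, col, colm)
--
--     colm = -1
--     while row < n + 1: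
--         row_list = []
--         row_list.append(rowcur(n, row, col, colm))
--         tri_sum += sum(row_list[0])
--         row += 1
--         colm = row
--
--     return tri_sum
-- ===== SOURCE B (Python) =====
-- def get_sum_buildingtriangle(n):
--     # Row r (0..n) contributes 2*r+c+1 for c = r..n; summing in closed form
--     # gives (n+1)(n+2)(4n+3)/6 for n >= 0, and 0 when n < 0 (empty triangle).
--     if n < 0:
--         return 0
--     return (n + 1) * (n + 2) * (4 * n + 3) // 6
-- ===== Notes on version B (the rewrite author's own statement) =====
-- stated objective: faster
-- what changed: Replaced the recursive row builder plus while-loop (building every row list and summing it) with a single closed-form cubic formula (n+1)(n+2)(4n+3)//6.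
import Mathlib
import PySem

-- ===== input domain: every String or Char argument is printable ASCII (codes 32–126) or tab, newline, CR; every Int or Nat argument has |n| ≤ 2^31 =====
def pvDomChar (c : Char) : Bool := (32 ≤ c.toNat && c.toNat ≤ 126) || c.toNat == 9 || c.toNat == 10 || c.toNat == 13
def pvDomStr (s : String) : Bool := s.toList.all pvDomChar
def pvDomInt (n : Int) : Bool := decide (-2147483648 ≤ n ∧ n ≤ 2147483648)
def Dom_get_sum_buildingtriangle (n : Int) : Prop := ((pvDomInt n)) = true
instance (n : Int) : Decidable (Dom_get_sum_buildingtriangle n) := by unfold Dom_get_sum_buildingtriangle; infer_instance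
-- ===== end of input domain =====

-- B replaces A's recursive row builder + while-loop with the closed-form
-- cubic (n+1)(n+2)(4n+3)//6 (0 for n < 0): an O(1) formula instead of O(n^2) work.


-- ===== PORT A =====
-- equation = lambda row, col: 2 * row + col + 1
def pvEquation (row col : Int) : Int := 2 * row + col + 1

-- def rowcur(n, row, col, colm): skip while colm > col, stop at col == n+1, else
-- append equation(row, col) and recurse.  The stop test is ported as 'n+1 ≤ col'
-- purely as a totality guard: Python diverges for col > n+1 (never reached from
-- get_sum_buildingtriangle); for col ≤ n+1 it is exactly 'col == n+1'.
def pvRowcur (n row col colm : Int) : List Int :=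
  if colm > col then pvRowcur n row (col + 1) colm
  else if n + 1 ≤ col then []
  else pvEquation row col :: pvRowcur n row (col + 1) colm
termination_by ((n + 1 - col).toNat + (colm - col).toNat)
decreasing_by
  · omega
  · omega

-- the while-loop: fuel = number of iterations (row goes 0,1,…,n while row < n+1)
def pvLoopA (fuel : Nat) (n row colm tri : Int) : Int :=
  match fuel with
  | 0 => tri
  | f + 1 =>
    if row < n + 1 then
      pvLoopA f n (row + 1) (row + 1) (tri + (pvRowcur n row 0 colm).sum)
    else tri

def get_sum_buildingtriangle (n : Int) : Int :=
  if n = 0 then 1 else pvLoopA (n + 1).toNat n 0 (-1) 0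

-- ===== PORT B =====
def get_sum_buildingtriangle_alt (n : Int) : Int :=
  if n < 0 then 0
  else PySem.Int.floordiv ((n + 1) * (n + 2) * (4 * n + 3)) 6

-- ===== PRECONDITION & SPEC =====
-- For large n the Python A raises RecursionError (rowcur's recursion depth grows
-- linearly with n, past CPython's default recursion limit); Pre_ keeps the inputs
-- below that limit, where A returns normally.
def Pre_get_sum_buildingtriangle (n : Int) : Prop := n ≤ 995
instance (n : Int) : Decidable (Pre_get_sum_buildingtriangle n) := by unfold Pre_get_sum_buildingtriangle; infer_instance
def pvWitness_get_sum_buildingtriangle : Int := 5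

def Spec_get_sum_buildingtriangle (n : Int) (out : Int) : Prop := out = get_sum_buildingtriangle_alt n
instance (n : Int) (out : Int) : Decidable (Spec_get_sum_buildingtriangle n out) := by unfold Spec_get_sum_buildingtriangle; infer_instance

-- ===== CLAIM (what is proved, stated in full; the proofs are below) =====
def Claim_equal_get_sum_buildingtriangle : Prop := ∀ (n : Int), Dom_get_sum_buildingtriangle n → Pre_get_sum_buildingtriangle n → Spec_get_sum_buildingtriangle n (get_sum_buildingtriangle n)

-- ===== LEMMAS AND PROOFS =====

-- 3 * Σ_{r=m}^{n} (n+1-r)(5r+n+2), as an explicit polynomial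
def pvQ (n m : Int) : Int :=
  4*n^3 + 15*n^2 + 17*n + 6 + m - 12*m^2 + 5*m^3 - 3*n*m - 6*n*m^2 - 3*n^2*m

-- sum of one row: twice the sum of rowcur starting at col (no skipping)
theorem pvRowcur_sum (k : Nat) (n row col colm : Int)
    (h1 : colm ≤ col) (h2 : col ≤ n + 1) (hk : (n + 1 - col).toNat = k) :
    2 * (pvRowcur n row col colm).sum = (k : Int) * (4 * row + col + n + 2) := by
  induction k generalizing col with
  | zero =>
    have hc : col = n + 1 := by omega
    rw [pvRowcur, if_neg (by omega), if_pos (by omega)]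
    simp
  | succ k ih =>
    have hlt : col < n + 1 := by omega
    rw [pvRowcur, if_neg (by omega), if_neg (by omega)]
    have h := ih (col + 1) (by omega) (by omega) (by omega)
    have hkc : (k : Int) = n - col := by omega
    rw [hkc] at h
    simp only [pvEquation, List.sum_cons]
    push_cast
    rw [hkc]
    linear_combination h

-- the skipping phase: rowcur from col < colm equals rowcur from colm
theorem pvRowcur_skip (s : Nat) (n row col colm : Int) (h : col + s = colm) :
    pvRowcur n row col colm = pvRowcur n row colm colm := by
  induction s generalizing col with
  | zero =>
    have hcc : col = colm := by omega
    rw [hcc]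
  | succ s ih =>
    rw [pvRowcur, if_pos (by omega)]
    exact ih (col + 1) (by omega)

-- loop invariant: six times the loop's result is 6·tri plus the polynomial tail
theorem pvLoopA_sum (k : Nat) (n row colm tri : Int)
    (hm : max colm 0 = row) (hr : row ≤ n + 1) (hk : (n + 1 - row).toNat = k) :
    6 * pvLoopA k n row colm tri = 6 * tri + pvQ n row := by
  induction k generalizing row colm tri with
  | zero =>
    have hc : row = n + 1 := by omega
    subst hc
    show 6 * tri = 6 * tri + pvQ n (n + 1)
    have : pvQ n (n + 1) = 0 := by unfold pvQ; ring
    omega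
  | succ k ih =>
    have hlt : row < n + 1 := by omega
    rw [pvLoopA, if_pos hlt]
    -- the row's sum starts effectively at col = row
    have hrow : pvRowcur n row 0 colm = pvRowcur n row row row ∨
        (colm ≤ 0 ∧ row = 0) := by
      by_cases hc : colm ≤ 0
      · right; exact ⟨hc, by omega⟩
      · left
        have hcr : colm = row := by omega
        subst hcr
        exact pvRowcur_skip colm.toNat n colm 0 colm (by omega)
    have hS : 2 * (pvRowcur n row 0 colm).sum = ((k : Int) + 1) * (5 * row + n + 2) := by
      rcases hrow with h | ⟨hc, h0⟩
      · rw [h]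
        have := pvRowcur_sum (k + 1) n row row row le_rfl (by omega) (by omega)
        push_cast at this
        calc 2 * (pvRowcur n row row row).sum = ((k : Int) + 1) * (4 * row + row + n + 2) := this
          _ = ((k : Int) + 1) * (5 * row + n + 2) := by ring
      · subst h0
        have := pvRowcur_sum (k + 1) n 0 0 colm hc (by omega) (by omega)
        push_cast at this
        simpa using this
    have h := ih (row + 1) (row + 1) (tri + (pvRowcur n row 0 colm).sum)
      (by omega) (by omega) (by omega)
    rw [h]
    have hkr : (k : Int) + 1 = n + 1 - row := by omega
    rw [hkr] at hS
    have hQ : pvQ n row = 3 * ((n + 1 - row) * (5 * row + n + 2)) + pvQ n (row + 1) := by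
      unfold pvQ; ring
    rw [hQ]
    linear_combination 3 * hS

-- ===== VERDICT (by name: the statement is the Claim_ definition above) =====
theorem get_sum_buildingtriangle_spec : Claim_equal_get_sum_buildingtriangle := by
  intro n _ _
  unfold Spec_get_sum_buildingtriangle get_sum_buildingtriangle get_sum_buildingtriangle_alt
  rcases lt_trichotomy n 0 with hn | hn | hn
  · rw [if_neg (by omega), if_pos hn]
    have : (n + 1).toNat = 0 := by omega
    rw [this, pvLoopA]
  · subst hn; decide
  · rw [if_neg (by omega), if_neg (by omega)]
    have h := pvLoopA_sum (n + 1).toNat n 0 (-1) 0 (by omega) (by omega) (by omega)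
    have hQ : pvQ n 0 = (n + 1) * (n + 2) * (4 * n + 3) := by unfold pvQ; ring
    rw [PySem.Int.floordiv_eq_ediv_of_pos (by norm_num), ← hQ]
    omega
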